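-- pv_equiv track=rewrite | github.com/kongdada/podcast-transcriber | scripts/podcast_workflow.py | split_keep_punct
-- ===== SOURCE A (Python) =====
-- def split_keep_punct(text: str, punctuation: str) -> list[str]:
--     pieces: list[str] = []
--     current = ""
--     for ch in text:
--         current += ch
--         if ch in punctuation:
--             pieces.append(current)
--             current = ""
--     if current:
--         pieces.append(current)
--     return pieces
-- ===== SOURCE B (Python) =====
-- def split_keep_punct(text: str, punctuation: str) -> list[str]:
--     punct = set(punctuation)
--     cuts = [i + 1 for i, ch in enumerate(text) if ch in punct]
--     pieces: list[str] = []
--     prev = 0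
--     for cut in cuts:
--         pieces.append(text[prev:cut])
--         prev = cut
--     if prev < len(text):
--         pieces.append(text[prev:])
--     return pieces
-- ===== Notes on version B (the rewrite author's own statement) =====
-- stated objective: alternative
-- what changed: B first computes the list of cut boundaries (index+1 of every punctuation char, via a set membership) and then builds the pieces by slicing the text between consecutive boundaries, instead of A's single scan that grows a current-piece accumulator character by character.
import Mathlib
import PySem

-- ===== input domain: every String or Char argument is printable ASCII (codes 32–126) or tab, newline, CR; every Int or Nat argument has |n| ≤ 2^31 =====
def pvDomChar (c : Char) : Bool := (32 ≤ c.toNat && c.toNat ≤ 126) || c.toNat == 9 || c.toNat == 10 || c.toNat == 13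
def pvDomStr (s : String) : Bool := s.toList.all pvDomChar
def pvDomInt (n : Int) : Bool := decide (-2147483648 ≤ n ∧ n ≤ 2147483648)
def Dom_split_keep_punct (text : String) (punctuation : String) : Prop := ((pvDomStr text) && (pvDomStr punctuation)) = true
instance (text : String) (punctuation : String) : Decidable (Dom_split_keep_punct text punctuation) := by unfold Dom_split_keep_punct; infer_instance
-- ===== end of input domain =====

-- B builds the list of cut boundaries first and then slices the text between
-- consecutive boundaries, instead of A's character-by-character accumulator scan.

-- ===== PORT A =====
-- A: single scan growing `current`, flushing it after each punctuation char
-- ('ch in punctuation' on a single char is char membership).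
def split_keep_punct (text : String) (punctuation : String) : List String :=
  let st := text.toList.foldl
    (fun (st : List String × List Char) ch =>
      let current := st.2 ++ [ch]
      if ch ∈ punctuation.toList then (st.1 ++ [String.ofList current], [])
      else (st.1, current))
    ([], [])
  if st.2 ≠ [] then st.1 ++ [String.ofList st.2] else st.1

-- ===== PORT B =====
-- B: cut boundaries i+1 for every punctuation position i, then slice between them.
def split_keep_punct_alt (text : String) (punctuation : String) : List String :=
  let cs := text.toList
  let punct := PySem.Set.ofList punctuation.toList
  let cuts := (PySem.List.enumerate cs).filterMap
    (fun ic => if ic.2 ∈ punct then some (ic.1 + 1) else none)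
  let st := cuts.foldl
    (fun (st : List String × Int) cut =>
      (st.1 ++ [String.ofList (PySem.List.slice cs (some st.2) (some cut))], cut))
    ([], 0)
  if st.2 < (cs.length : Int) then st.1 ++ [String.ofList (cs.drop st.2.toNat)] else st.1

-- ===== PRECONDITION & SPEC =====
def Spec_split_keep_punct (text : String) (punctuation : String) (out : List String) : Prop := out = split_keep_punct_alt text punctuation
instance (text : String) (punctuation : String) (out : List String) : Decidable (Spec_split_keep_punct text punctuation out) := by unfold Spec_split_keep_punct; infer_instance

-- ===== CLAIM (what is proved, stated in full; the proofs are below) =====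
def Claim_equal_split_keep_punct : Prop := ∀ (text : String) (punctuation : String), Dom_split_keep_punct text punctuation → Spec_split_keep_punct text punctuation (split_keep_punct text punctuation)

-- ===== LEMMAS AND PROOFS =====

-- canonical recursive splitter both ports are reduced to
def pvSpec (p : List Char) : List Char → List Char → List String
  | [], cur => if cur = [] then [] else [String.ofList cur]
  | c :: rest, cur =>
      if c ∈ p then String.ofList (cur ++ [c]) :: pvSpec p rest []
      else pvSpec p rest (cur ++ [c])

theorem pvA_loop (p : List Char) (cs : List Char) :
    ∀ (pieces : List String) (cur : List Char),
    (let st := cs.foldl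
      (fun (st : List String × List Char) ch =>
        let current := st.2 ++ [ch]
        if ch ∈ p then (st.1 ++ [String.ofList current], []) else (st.1, current))
      (pieces, cur)
     if st.2 ≠ [] then st.1 ++ [String.ofList st.2] else st.1)
    = pieces ++ pvSpec p cs cur := by
  induction cs with
  | nil =>
    intro pieces cur
    simp only [List.foldl_nil, pvSpec]
    by_cases h : cur = [] <;> simp [h]
  | cons c rest ih =>
    intro pieces cur
    simp only [List.foldl_cons, pvSpec]
    by_cases h : c ∈ p <;> simp only [h, if_true, if_false, ih, List.append_assoc] <;> simp

def pvCuts (p : List Char) (cs : List Char) (s : Int) : List Int :=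
  (PySem.List.enumerate cs s).filterMap
    (fun ic => if ic.2 ∈ p then some (ic.1 + 1) else none)

theorem pvCuts_cons (p : List Char) (c : Char) (rest : List Char) (s : Int) :
    pvCuts p (c :: rest) s
      = (if c ∈ p then [s + 1] else []) ++ pvCuts p rest (s + 1) := by
  by_cases h : c ∈ p <;> simp [pvCuts, PySem.List.enumerate_cons, h]

theorem pvB_loop (p : List Char) (r : List Char) :
    ∀ (base : List Char) (prev : Nat) (pieces : List String), prev ≤ base.length →
    (let cs := base ++ r
     let st := (pvCuts p r (base.length : Int)).foldl
      (fun (st : List String × Int) cut =>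
        (st.1 ++ [String.ofList (PySem.List.slice cs (some st.2) (some cut))], cut))
      (pieces, (prev : Int))
     if st.2 < (cs.length : Int) then st.1 ++ [String.ofList (cs.drop st.2.toNat)] else st.1)
    = pieces ++ pvSpec p r (base.drop prev) := by
  induction r with
  | nil =>
    intro base prev pieces hle
    simp only [pvCuts, PySem.List.enumerate_nil, List.filterMap_nil, List.foldl_nil,
      List.append_nil, pvSpec, Int.toNat_natCast]
    by_cases h : prev < base.length
    · have hne : ¬ (base.drop prev = []) := by rw [List.drop_eq_nil_iff]; omega
      rw [if_pos (show (prev : Int) < (base.length : Int) from by exact_mod_cast h), if_neg hne]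
    · have he : base.drop prev = [] := by rw [List.drop_eq_nil_iff]; omega
      rw [if_neg (show ¬ (prev : Int) < (base.length : Int) from by exact_mod_cast h), he,
        if_pos rfl, List.append_nil]
  | cons c rest ih =>
    intro base prev pieces hle
    rw [pvCuts_cons]
    by_cases h : c ∈ p
    · simp only [h, if_true, List.singleton_append, List.foldl_cons]
      have hcast : (base.length : Int) + 1 = ((base.length + 1 : Nat) : Int) := by push_cast; ring
      rw [hcast]
      have hslice : PySem.List.slice (base ++ c :: rest) (some (prev : Int))
          (some ((base.length + 1 : Nat) : Int))
          = base.drop prev ++ [c] := by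
        rw [PySem.List.slice_natCast]
        rw [List.drop_append_of_le_length hle]
        have hlen : (base.drop prev).length = base.length - prev := by simp
        rw [List.take_append, hlen]
        have h1 : base.length + 1 - prev - (base.length - prev) = 1 := by omega
        simp [h1, (by omega : base.length - prev ≤ base.length + 1 - prev)]
      rw [hslice]
      have hdrop : (base ++ [c]).drop (base.length + 1) = [] := by simp
      have := ih (base ++ [c]) (base.length + 1) (pieces ++ [String.ofList (base.drop prev ++ [c])]) (by simp)
      simp only [List.append_assoc, List.singleton_append, List.length_append,
        List.length_singleton, hdrop] at this
      simp only [List.length_append]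
      rw [this]
      simp [pvSpec, h]
    · simp only [h, if_false, List.nil_append]
      have := ih (base ++ [c]) prev pieces (by simp; omega)
      simp only [List.append_assoc, List.singleton_append, List.length_append,
        List.length_singleton] at this
      have hcast : ((base.length : Int) + 1) = ((base.length + 1 : Nat) : Int) := by push_cast; ring
      simp only [List.length_append]
      rw [hcast, this, List.drop_append_of_le_length hle]
      simp [pvSpec, h]

-- ===== VERDICT (by name: the statement is the Claim_ definition above) =====
theorem split_keep_punct_spec : Claim_equal_split_keep_punct := by
  intro text punctuation _
  unfold Spec_split_keep_punct split_keep_punct split_keep_punct_alt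
  have hA := pvA_loop punctuation.toList text.toList [] []
  simp only [List.nil_append] at hA
  have hB := pvB_loop punctuation.toList text.toList [] 0 [] (by simp)
  simp only [List.nil_append, List.length_nil, Nat.cast_zero, List.drop_zero, pvCuts] at hB
  simp only [PySem.Set.mem_ofList]
  rw [hA]
  exact hB.symm
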